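-- pv_equiv track=rewrite | github.com/2025-2026-estia-bihar/manuelli_laurent_projet_final | Model/training/utils.py | resolve_requested_classes
-- ===== SOURCE A (Python) =====
-- from typing import Iterable, List, Sequence
--
-- CLASS_ALIASES = {
--     "chao": "ground",
--     "milho": "corn",
--     "ervas": "weeds",
--     "milho_ervas": "corn_weeds",
--     "milho-ervas": "corn_weeds",
-- }
--
-- def normalize_label(label: str) -> str:
--     return CLASS_ALIASES.get(label.lower(), label)
--
-- def resolve_requested_classes(all_classes: Sequence[str], requested: Sequence[str]) -> List[str]:
--     normalized_all = {normalize_label(cls).lower(): cls for cls in all_classes}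
--     keep = []
--     for req in requested:
--         key = normalize_label(req).lower()
--         if key in normalized_all:
--             keep.append(normalized_all[key])
--     return keep
-- ===== SOURCE B (Python) =====
-- CLASS_ALIASES = {
--     "chao": "ground",
--     "milho": "corn",
--     "ervas": "weeds",
--     "milho_ervas": "corn_weeds",
--     "milho-ervas": "corn_weeds",
-- }
--
-- def normalize_label(label):
--     return CLASS_ALIASES.get(label.lower(), label)
--
-- def resolve_requested_classes(all_classes, requested):
--     keep = []
--     for req in requested:
--         key = normalize_label(req).lower()
--         found = None
--         for cls in all_classes:
--             if normalize_label(cls).lower() == key: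
--                 found = cls
--         if found is not None:
--             keep.append(found)
--     return keep
-- ===== Notes on version B (the rewrite author's own statement) =====
-- stated objective: alternative
-- what changed: Replaces A's prebuilt normalized-key dictionary with a direct per-request linear scan of all_classes that keeps the last matching original class name (reproducing the dict's last-wins overwrite), so no index structure is built.
import Mathlib
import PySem

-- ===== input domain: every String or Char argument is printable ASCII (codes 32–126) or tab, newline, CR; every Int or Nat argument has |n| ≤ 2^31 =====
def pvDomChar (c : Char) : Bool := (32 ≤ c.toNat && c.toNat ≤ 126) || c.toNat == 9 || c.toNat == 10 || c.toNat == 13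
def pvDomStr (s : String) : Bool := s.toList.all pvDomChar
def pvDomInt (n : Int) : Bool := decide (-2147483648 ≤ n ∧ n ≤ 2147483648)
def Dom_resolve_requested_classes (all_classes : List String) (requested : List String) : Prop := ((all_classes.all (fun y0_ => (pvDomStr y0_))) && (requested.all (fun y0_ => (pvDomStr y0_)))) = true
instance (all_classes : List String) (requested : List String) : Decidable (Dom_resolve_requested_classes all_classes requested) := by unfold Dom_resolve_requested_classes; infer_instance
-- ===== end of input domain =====

-- B replaces A's prebuilt normalized-key dictionary with a per-request linear scan keeping the
-- last matching original class (alternative decomposition, not faster).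

-- ===== PORT A =====
def CLASS_ALIASES : PySem.Dict String String :=
  PySem.Dict.ofList [("chao", "ground"), ("milho", "corn"), ("ervas", "weeds"),
    ("milho_ervas", "corn_weeds"), ("milho-ervas", "corn_weeds")]

def normalize_label (label : String) : String :=
  CLASS_ALIASES.getD (PySem.Str.lower label) label

def resolve_requested_classes (all_classes : List String) (requested : List String) : List String :=
  let normalized_all : PySem.Dict String String :=
    all_classes.foldl (fun d cls => d.insert (PySem.Str.lower (normalize_label cls)) cls) PySem.Dict.empty
  requested.foldl (fun keep req =>
    let key := PySem.Str.lower (normalize_label req)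
    match normalized_all.get? key with
    | some v => keep ++ [v]
    | none => keep) []

-- ===== PORT B =====
def resolve_requested_classes_alt (all_classes : List String) (requested : List String) : List String :=
  requested.foldl (fun keep req =>
    let key := PySem.Str.lower (normalize_label req)
    let found := all_classes.foldl
      (fun acc cls => if PySem.Str.lower (normalize_label cls) == key then some cls else acc)
      (none : Option String)
    match found with
    | some c => keep ++ [c]
    | none => keep) []

-- ===== PRECONDITION & SPEC =====
def Spec_resolve_requested_classes (all_classes : List String) (requested : List String) (out : List String) : Prop := out = resolve_requested_classes_alt all_classes requested
instance (all_classes : List String) (requested : List String) (out : List String) : Decidable (Spec_resolve_requested_classes all_classes requested out) := by unfold Spec_resolve_requested_classes; infer_instance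

-- ===== CLAIM (what is proved, stated in full; the proofs are below) =====
def Claim_equal_resolve_requested_classes : Prop := ∀ (all_classes : List String) (requested : List String), Dom_resolve_requested_classes all_classes requested → Spec_resolve_requested_classes all_classes requested (resolve_requested_classes all_classes requested)

-- ===== LEMMAS AND PROOFS =====

-- Lookup in the insert-built dict is the last-match fold with the old lookup as the initial value.
theorem get?_foldl_insert_key (l : List String) (d : PySem.Dict String String) (q : String) :
    (l.foldl (fun d cls => d.insert (PySem.Str.lower (normalize_label cls)) cls) d).get? q =
      l.foldl (fun acc cls => if PySem.Str.lower (normalize_label cls) == q then some cls else acc)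
        (d.get? q) := by
  induction l generalizing d with
  | nil => rfl
  | cons c l ih =>
    simp only [List.foldl_cons, ih, PySem.Dict.get?_insert]
    by_cases h : PySem.Str.lower (normalize_label c) = q
    · simp [h]
    · simp [h, Ne.symm h]

-- Two folds with pointwise-equal step functions agree.
theorem pv_foldl_ext {α β : Type} (f g : α → β → α) (h : ∀ a b, f a b = g a b) :
    ∀ (l : List β) (init : α), l.foldl f init = l.foldl g init := by
  intro l
  induction l with
  | nil => intro init; rfl
  | cons x xs ih => intro init; simp only [List.foldl_cons, h]; exact ih _

-- ===== VERDICT (by name: the statement is the Claim_ definition above) =====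
theorem resolve_requested_classes_spec : Claim_equal_resolve_requested_classes := by
  intro all_classes requested _
  unfold Spec_resolve_requested_classes resolve_requested_classes resolve_requested_classes_alt
  have hstep : ∀ (keep : List String) (req : String),
      (match (all_classes.foldl (fun d cls => d.insert (PySem.Str.lower (normalize_label cls)) cls)
          PySem.Dict.empty).get? (PySem.Str.lower (normalize_label req)) with
        | some v => keep ++ [v]
        | none => keep) =
      (match all_classes.foldl
          (fun acc cls => if PySem.Str.lower (normalize_label cls) == PySem.Str.lower (normalize_label req)
            then some cls else acc) (none : Option String) with
        | some c => keep ++ [c]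
        | none => keep) := by
    intro keep req
    rw [get?_foldl_insert_key, PySem.Dict.get?_empty]
  exact pv_foldl_ext _ _ hstep requested []
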